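-- pv_equiv track=rewrite | github.com/zhoudayang/semeval_2010_task8 | pretreat/semeval_2010.py | concat_entity
-- ===== SOURCE A (Python) =====
-- def concat_entity(words, e1, e2):
--     ret_words = []
--     i = 0
--     while i < len(words):
--         if words[i] == "<e1>":
--             ret_words.append(words[i])
--             j = i + 1
--             while j < len(words) and words[j] != "</e1>":
--                 j += 1
--             ret_words.append(e1)
--             i = j
--             continue
--         elif words[i] == "<e2>":
--             ret_words.append(words[i])
--             j = i + 1
--             while j < len(words) and words[j] != "</e2>":
--                 j += 1
--             ret_words.append(e2)
--             i = j
--             continue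
--         else:
--             ret_words.append(words[i])
--             i += 1
--     return ret_words
-- ===== SOURCE B (Python) =====
-- def concat_entity(words, e1, e2):
--     out = []
--     closing = None  # the close tag we are waiting for, if inside a span
--     for w in words:
--         if closing is not None:
--             if w == closing:
--                 out.append(w)
--                 closing = None
--         elif w == "<e1>":
--             out.append(w)
--             out.append(e1)
--             closing = "</e1>"
--         elif w == "<e2>":
--             out.append(w)
--             out.append(e2)
--             closing = "</e2>"
--         else:
--             out.append(w)
--     return out
-- ===== Notes on version B (the rewrite author's own statement) =====
-- stated objective: simpler
-- what changed: Replaced the index-based while loop with an inner pointer-advancing scan by a single flat for-loop over the words that carries the awaited closing tag as state, so span-skipping becomes a flag instead of pointer arithmetic.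
import Mathlib
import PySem

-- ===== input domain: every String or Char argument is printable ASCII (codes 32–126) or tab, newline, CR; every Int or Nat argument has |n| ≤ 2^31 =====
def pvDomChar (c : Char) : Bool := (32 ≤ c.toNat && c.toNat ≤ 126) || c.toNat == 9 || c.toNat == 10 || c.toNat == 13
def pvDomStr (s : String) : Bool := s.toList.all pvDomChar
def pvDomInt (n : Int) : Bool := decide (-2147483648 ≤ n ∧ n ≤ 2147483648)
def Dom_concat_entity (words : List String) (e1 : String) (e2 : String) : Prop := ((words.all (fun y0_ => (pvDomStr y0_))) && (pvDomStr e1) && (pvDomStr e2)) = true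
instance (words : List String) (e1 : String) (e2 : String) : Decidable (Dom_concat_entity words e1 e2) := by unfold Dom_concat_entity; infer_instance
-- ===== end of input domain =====

-- B replaces A's while loop with inner pointer-skipping scans by a flat fold that carries
-- the awaited closing tag as state (objective: simpler decomposition, same cost).

-- ===== PORT A =====
-- inner while loop: advance j until words[j] == tag or j == len(words)
def ceSkip (words : List String) (tag : String) (j : Nat) : Nat :=
  if j < words.length then
    if words.getD j "" ≠ tag then ceSkip words tag (j + 1) else j
  else j
termination_by words.length - j

theorem ceSkip_ge (words : List String) (tag : String) (j : Nat) : j ≤ ceSkip words tag j := by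
  unfold ceSkip
  split
  · split
    · exact le_trans (Nat.le_succ j) (ceSkip_ge words tag (j+1))
    · exact le_refl j
  · exact le_refl j
termination_by words.length - j

-- outer while loop on index i with accumulator ret_words
def ceLoop (words : List String) (e1 e2 : String) (acc : List String) (i : Nat) : List String :=
  if h : i < words.length then
    let w := words.getD i ""
    if w = "<e1>" then
      ceLoop words e1 e2 (acc ++ [w, e1]) (ceSkip words "</e1>" (i + 1))
    else if w = "<e2>" then
      ceLoop words e1 e2 (acc ++ [w, e2]) (ceSkip words "</e2>" (i + 1))
    else
      ceLoop words e1 e2 (acc ++ [w]) (i + 1)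
  else acc
termination_by words.length - i
decreasing_by
  · have := ceSkip_ge words "</e1>" (i + 1); omega
  · have := ceSkip_ge words "</e2>" (i + 1); omega
  · omega

def concat_entity (words : List String) (e1 : String) (e2 : String) : List String :=
  ceLoop words e1 e2 [] 0

-- ===== PORT B =====
-- one step of Source B's for-loop: state = (out, closing)
def ceStep (e1 e2 : String) (st : List String × Option String) (w : String) :
    List String × Option String :=
  match st.2 with
  | some t => if w = t then (st.1 ++ [w], none) else (st.1, some t)
  | none =>
    if w = "<e1>" then (st.1 ++ [w, e1], some "</e1>")
    else if w = "<e2>" then (st.1 ++ [w, e2], some "</e2>")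
    else (st.1 ++ [w], none)

def concat_entity_alt (words : List String) (e1 : String) (e2 : String) : List String :=
  (words.foldl (ceStep e1 e2) ([], none)).1

-- ===== PRECONDITION & SPEC =====
def Spec_concat_entity (words : List String) (e1 : String) (e2 : String) (out : List String) : Prop := out = concat_entity_alt words e1 e2
instance (words : List String) (e1 : String) (e2 : String) (out : List String) : Decidable (Spec_concat_entity words e1 e2 out) := by unfold Spec_concat_entity; infer_instance

-- ===== CLAIM (what is proved, stated in full; the proofs are below) =====
def Claim_equal_concat_entity : Prop := ∀ (words : List String) (e1 : String) (e2 : String), Dom_concat_entity words e1 e2 → Spec_concat_entity words e1 e2 (concat_entity words e1 e2)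

-- ===== LEMMAS AND PROOFS =====

theorem ceSkip_spec (words : List String) (tag : String) (j : Nat) :
    (ceSkip words tag j < words.length → words.getD (ceSkip words tag j) "" = tag) := by
  unfold ceSkip
  split
  · split
    · exact ceSkip_spec words tag (j+1)
    · rename_i heq
      intro _; exact not_not.mp heq
  · rename_i hge
    intro h'; exact absurd h' hge
termination_by words.length - j

-- folding B's step with the flag set over words.drop k equals folding it from the
-- position ceSkip finds (everything in between fails the w = tag test)
theorem foldB_skip (words : List String) (e1 e2 tag : String) (k : Nat) (acc : List String) :
    List.foldl (ceStep e1 e2) (acc, some tag) (words.drop k) =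
    List.foldl (ceStep e1 e2) (acc, some tag) (words.drop (ceSkip words tag k)) := by
  unfold ceSkip
  split
  · rename_i hk
    split
    · rename_i hne
      have hd : words.drop k = words.getD k "" :: words.drop (k + 1) := by
        rw [List.getD_eq_getElem _ _ hk]
        exact (List.drop_eq_getElem_cons hk).symm ▸ rfl
      rw [hd, List.foldl_cons]
      have : ceStep e1 e2 (acc, some tag) (words.getD k "") = (acc, some tag) := by
        simp [ceStep, List.getD] at hne ⊢; simp [hne]
      rw [this]
      exact foldB_skip words e1 e2 tag (k+1) acc
    · rfl
  · rfl
termination_by words.length - k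

theorem ceLoop_eq_foldB (words : List String) (e1 e2 : String) (n : Nat) :
    ∀ i acc, words.length - i ≤ n →
    ceLoop words e1 e2 acc i =
      (List.foldl (ceStep e1 e2) (acc, none) (words.drop i)).1 := by
  induction n with
  | zero =>
    intro i acc h
    have hi : ¬ i < words.length := by omega
    rw [ceLoop]
    simp [hi, List.drop_eq_nil_of_le (by omega : words.length ≤ i)]
  | succ n ih =>
    intro i acc h
    rw [ceLoop]
    by_cases hi : i < words.length
    · simp only [hi, dif_pos]
      have hgi : words[i] = words.getD i "" := by
        rw [List.getD_eq_getElem _ _ hi]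
      have hd : words.drop i = words.getD i "" :: words.drop (i + 1) := by
        rw [List.drop_eq_getElem_cons hi, hgi]
      by_cases h1 : words.getD i "" = "<e1>"
      · rw [hd, List.foldl_cons]
        simp only [h1, reduceIte]
        have hstep : ceStep e1 e2 (acc, none) "<e1>" = (acc ++ ["<e1>", e1], some "</e1>") := by
          simp [ceStep]
        rw [hstep, foldB_skip words e1 e2 "</e1>" (i+1) (acc ++ ["<e1>", e1])]
        set j := ceSkip words "</e1>" (i + 1) with hj
        have hji : i + 1 ≤ j := ceSkip_ge words "</e1>" (i+1)
        by_cases hjl : j < words.length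
        · have hwt : words.getD j "" = "</e1>" := ceSkip_spec words "</e1>" (i+1) hjl
          have hgj : words[j] = "</e1>" := by
            have := hwt; rwa [List.getD_eq_getElem _ _ hjl] at this
          have hdj : words.drop j = "</e1>" :: words.drop (j + 1) := by
            rw [List.drop_eq_getElem_cons hjl, hgj]
          rw [hdj, List.foldl_cons]
          have hs2 : ceStep e1 e2 (acc ++ ["<e1>", e1], some "</e1>") "</e1>" =
              (acc ++ ["<e1>", e1, "</e1>"], none) := by
            simp [ceStep]
          rw [hs2]
          have hL : ceLoop words e1 e2 (acc ++ ["<e1>", e1]) j =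
              ceLoop words e1 e2 (acc ++ ["<e1>", e1, "</e1>"]) (j + 1) := by
            conv_lhs => rw [ceLoop]
            simp [hjl, hgj]
          rw [hL]
          exact ih (j+1) _ (by omega)
        · have hL : ceLoop words e1 e2 (acc ++ ["<e1>", e1]) j = acc ++ ["<e1>", e1] := by
            rw [ceLoop]; simp [hjl]
          rw [hL]
          simp [List.drop_eq_nil_of_le (by omega : words.length ≤ j)]
      · by_cases h2 : words.getD i "" = "<e2>"
        · rw [hd, List.foldl_cons]
          simp only [h2, reduceIte]
          have hstep : ceStep e1 e2 (acc, none) "<e2>" = (acc ++ ["<e2>", e2], some "</e2>") := by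
            simp [ceStep]
          rw [hstep, foldB_skip words e1 e2 "</e2>" (i+1) (acc ++ ["<e2>", e2])]
          set j := ceSkip words "</e2>" (i + 1) with hj
          have hji : i + 1 ≤ j := ceSkip_ge words "</e2>" (i+1)
          by_cases hjl : j < words.length
          · have hwt : words.getD j "" = "</e2>" := ceSkip_spec words "</e2>" (i+1) hjl
            have hgj : words[j] = "</e2>" := by
              have := hwt; rwa [List.getD_eq_getElem _ _ hjl] at this
            have hdj : words.drop j = "</e2>" :: words.drop (j + 1) := by
              rw [List.drop_eq_getElem_cons hjl, hgj]
            rw [hdj, List.foldl_cons]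
            have hs2 : ceStep e1 e2 (acc ++ ["<e2>", e2], some "</e2>") "</e2>" =
                (acc ++ ["<e2>", e2, "</e2>"], none) := by
              simp [ceStep]
            rw [hs2]
            have hL : ceLoop words e1 e2 (acc ++ ["<e2>", e2]) j =
                ceLoop words e1 e2 (acc ++ ["<e2>", e2, "</e2>"]) (j + 1) := by
              conv_lhs => rw [ceLoop]
              simp [hjl, hgj]
            rw [hL]
            exact ih (j+1) _ (by omega)
          · have hL : ceLoop words e1 e2 (acc ++ ["<e2>", e2]) j = acc ++ ["<e2>", e2] := by
              rw [ceLoop]; simp [hjl]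
            rw [hL]
            simp [List.drop_eq_nil_of_le (by omega : words.length ≤ j)]
        · rw [hd, List.foldl_cons, if_neg h1, if_neg h2]
          have hstep : ceStep e1 e2 (acc, none) (words.getD i "") = (acc ++ [words.getD i ""], none) := by
            simp only [List.getD] at h1 h2
            simp [ceStep, h1, h2]
          rw [hstep]
          exact ih (i+1) _ (by omega)
    · simp [hi, List.drop_eq_nil_of_le (by omega : words.length ≤ i)]

-- ===== VERDICT (by name: the statement is the Claim_ definition above) =====
theorem concat_entity_spec : Claim_equal_concat_entity := by
  intro words e1 e2 _
  unfold Spec_concat_entity concat_entity concat_entity_alt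
  simpa using ceLoop_eq_foldB words e1 e2 words.length 0 [] (by omega)
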